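-- pv_equiv track=rewrite | github.com/HUBERILT/CSPM | Compressing_mine/main.py | get_c_coreItems
-- ===== SOURCE A (Python) =====
-- def get_c_coreItems(transform_data, c_set):
--     c_coreItems = {}
--     for k in c_set:
--         sum_c = 0
--         for l_value in transform_data:
--             if k in transform_data[l_value].keys():
--                 sum_c += len(transform_data[l_value][k])
--         if sum_c > 0:
--             c_coreItems.setdefault(k, sum_c)
--     return c_coreItems
-- ===== SOURCE B (Python) =====
-- def get_c_coreItems(transform_data, c_set):
--     # one pass over all inner entries accumulating lengths per key,
--     # then emit in c_set order (first occurrence, positive sums only)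
--     counts = {}
--     for inner in transform_data.values():
--         for k, lst in inner.items():
--             counts[k] = counts.get(k, 0) + len(lst)
--     out = {}
--     for k in c_set:
--         if counts.get(k, 0) > 0:
--             out.setdefault(k, counts[k])
--     return out
-- ===== Notes on version B (the rewrite author's own statement) =====
-- stated objective: faster
-- what changed: Instead of rescanning the whole nested dict once per c_set key, B makes a single pass over all inner entries accumulating length sums into a dict keyed by item, then emits results in c_set order.
import Mathlib
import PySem

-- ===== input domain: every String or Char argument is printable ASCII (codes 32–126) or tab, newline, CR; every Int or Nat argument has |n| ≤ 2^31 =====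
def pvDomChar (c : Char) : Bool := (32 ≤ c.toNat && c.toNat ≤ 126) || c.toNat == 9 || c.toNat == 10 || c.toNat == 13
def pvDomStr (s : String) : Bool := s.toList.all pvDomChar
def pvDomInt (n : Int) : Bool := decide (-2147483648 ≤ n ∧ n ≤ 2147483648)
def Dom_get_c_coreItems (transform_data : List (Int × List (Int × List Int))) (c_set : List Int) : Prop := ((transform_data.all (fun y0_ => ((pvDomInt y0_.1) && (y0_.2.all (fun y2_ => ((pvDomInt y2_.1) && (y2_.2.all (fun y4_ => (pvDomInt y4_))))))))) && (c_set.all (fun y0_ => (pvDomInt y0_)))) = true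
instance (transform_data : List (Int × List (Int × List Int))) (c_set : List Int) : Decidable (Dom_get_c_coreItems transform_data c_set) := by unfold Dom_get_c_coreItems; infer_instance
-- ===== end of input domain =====

-- B replaces A's per-key rescans of the whole nested dict by a single accumulation
-- pass over all inner entries (objective: faster, asymptotic).

-- ===== PORT A =====
-- A: for each k in c_set, scan every row of transform_data, add len(transform_data[l][k]) if present.
def get_c_coreItems (transform_data : List (Int × List (Int × List Int))) (c_set : List Int) : List (Int × Int) :=
  let td : PySem.Dict Int (PySem.Dict Int (List Int)) :=
    PySem.Dict.ofList (transform_data.map (fun p => (p.1, PySem.Dict.ofList p.2)))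
  let res := c_set.foldl (fun (d : PySem.Dict Int Int) k =>
    let sum_c : Int := td.items.foldl (fun s row =>
      if row.2.contains k then s + ((row.2.getD k []).length : Int) else s) 0
    if sum_c > 0 then d.setdefault k sum_c else d) PySem.Dict.empty
  res.items

-- ===== PORT B =====
-- B: one pass building counts[k] = total length, then emit in c_set order.
def get_c_coreItems_alt (transform_data : List (Int × List (Int × List Int))) (c_set : List Int) : List (Int × Int) :=
  let td : PySem.Dict Int (PySem.Dict Int (List Int)) :=
    PySem.Dict.ofList (transform_data.map (fun p => (p.1, PySem.Dict.ofList p.2)))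
  let counts : PySem.Dict Int Int := td.values.foldl (fun c inner =>
    inner.items.foldl (fun (c : PySem.Dict Int Int) p =>
      c.insert p.1 (c.getD p.1 0 + (p.2.length : Int))) c) PySem.Dict.empty
  let out := c_set.foldl (fun (d : PySem.Dict Int Int) k =>
    if counts.getD k 0 > 0 then d.setdefault k (counts.getD k 0) else d) PySem.Dict.empty
  out.items

-- ===== PRECONDITION & SPEC =====
def Spec_get_c_coreItems (transform_data : List (Int × List (Int × List Int))) (c_set : List Int) (out : List (Int × Int)) : Prop := out = get_c_coreItems_alt transform_data c_set
instance (transform_data : List (Int × List (Int × List Int))) (c_set : List Int) (out : List (Int × Int)) : Decidable (Spec_get_c_coreItems transform_data c_set out) := by unfold Spec_get_c_coreItems; infer_instance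

-- ===== CLAIM (what is proved, stated in full; the proofs are below) =====
def Claim_equal_get_c_coreItems : Prop := ∀ (transform_data : List (Int × List (Int × List Int))) (c_set : List Int), Dom_get_c_coreItems transform_data c_set → Spec_get_c_coreItems transform_data c_set (get_c_coreItems transform_data c_set)

-- ===== LEMMAS AND PROOFS =====

-- one inner-entry accumulation pass updates the queried key by the filtered length sum
theorem pv_getD_insert_len (l : List (Int × List Int)) (k : Int) :
    ∀ c : PySem.Dict Int Int,
    (l.foldl (fun (c : PySem.Dict Int Int) p => c.insert p.1 (c.getD p.1 0 + (p.2.length : Int))) c).getD k 0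
      = c.getD k 0 + ((l.filter (fun p => p.1 == k)).map (fun p => ((p.2.length : Nat) : Int))).sum := by
  induction l with
  | nil => intro c; simp
  | cons hd tl ih =>
      intro c
      simp only [List.foldl_cons, ih, List.filter_cons]
      by_cases h : hd.1 = k
      · simp [h, PySem.Dict.getD_insert]; ring
      · simp [h, Ne.symm h, PySem.Dict.getD_insert]

-- for nodup keys the filtered length sum is A's per-row contribution
theorem pv_filter_sum_of_nodup (l : List (Int × List Int)) (k : Int)
    (hnd : (l.map Prod.fst).Nodup) :
    ((l.filter (fun p => p.1 == k)).map (fun p => ((p.2.length : Nat) : Int))).sum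
      = (if (PySem.Dict.mk l).contains k then (((PySem.Dict.mk l).getD k []).length : Int) else 0) := by
  induction l with
  | nil => simp [PySem.Dict.contains, PySem.Dict.get?, PySem.Dict.getD]
  | cons hd tl ih =>
      simp only [List.map_cons, List.nodup_cons] at hnd
      by_cases h : hd.1 = k
      · have hfil : tl.filter (fun p => p.1 == k) = [] := by
          apply List.filter_eq_nil_iff.mpr
          intro p hp hbeq
          exact hnd.1 (by rw [h, ← (by simpa using hbeq : p.1 = k)]; exact List.mem_map_of_mem hp)
        simp [List.filter_cons, h, hfil, PySem.Dict.contains, PySem.Dict.get?, PySem.Dict.getD]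
      · have h2 := ih hnd.2
        simp only [List.filter_cons, show (hd.1 == k) = false by simp [h], Bool.false_eq_true,
          if_false] at *
        rw [h2]
        have hg : (PySem.Dict.mk (hd :: tl)).get? k = (PySem.Dict.mk tl).get? k := by
          rw [PySem.Dict.get?_mk_cons, show (hd.1 == k) = false by simp [h]]; simp
        rw [PySem.Dict.contains_eq_isSome_get?, PySem.Dict.contains_eq_isSome_get?,
            PySem.Dict.getD_eq_get?_getD, PySem.Dict.getD_eq_get?_getD, hg]

-- values of an insert-fold come from the start dict or the pair list
theorem pv_mem_values_foldl_insert {κ ν : Type} [BEq κ] [LawfulBEq κ] (l : List (κ × ν)) :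
    ∀ (d : PySem.Dict κ ν) (w : ν),
    w ∈ (l.foldl (fun d p => d.insert p.1 p.2) d).values → w ∈ d.values ∨ ∃ p ∈ l, w = p.2 := by
  induction l with
  | nil => intro d w h; exact Or.inl h
  | cons hd tl ih =>
      intro d w h
      rcases ih _ _ h with h' | ⟨p, hp, hw⟩
      · rcases PySem.Dict.mem_values_insert _ _ _ _ h' with h'' | h''
        · exact Or.inr ⟨hd, List.mem_cons_self, h''⟩
        · exact Or.inl h''
      · exact Or.inr ⟨p, List.mem_cons_of_mem _ hp, hw⟩

-- B's counts dict holds exactly A's per-key sum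
theorem pv_counts_getD (rows : List (PySem.Dict Int (List Int))) (k : Int)
    (hnd : ∀ r ∈ rows, (r.items.map Prod.fst).Nodup) :
    ∀ c : PySem.Dict Int Int,
    (rows.foldl (fun c inner =>
        inner.items.foldl (fun (c : PySem.Dict Int Int) p =>
          c.insert p.1 (c.getD p.1 0 + (p.2.length : Int))) c) c).getD k 0
      = c.getD k 0 + (rows.map (fun r => if r.contains k then ((r.getD k []).length : Int) else 0)).sum := by
  induction rows with
  | nil => intro c; simp
  | cons hd tl ih =>
      intro c
      simp only [List.foldl_cons, List.map_cons, List.sum_cons]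
      rw [ih (fun r hr => hnd r (List.mem_cons_of_mem _ hr)), pv_getD_insert_len,
          pv_filter_sum_of_nodup hd.items k (hnd hd List.mem_cons_self)]
      have h1 : PySem.Dict.mk hd.items = hd := rfl
      rw [h1]; ring

-- A's inner scan computed as a sum
theorem pv_A_sum (rows : List (Int × PySem.Dict Int (List Int))) (k : Int) :
    ∀ s0 : Int,
    rows.foldl (fun s row =>
        if row.2.contains k then s + ((row.2.getD k []).length : Int) else s) s0
      = s0 + (rows.map (fun row => if row.2.contains k then ((row.2.getD k []).length : Int) else 0)).sum := by
  induction rows with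
  | nil => intro s0; simp
  | cons hd tl ih =>
      intro s0
      simp only [List.foldl_cons, List.map_cons, List.sum_cons]
      by_cases h : hd.2.contains k <;> simp [h, ih] <;> ring

-- ===== VERDICT (by name: the statement is the Claim_ definition above) =====
theorem get_c_coreItems_spec : Claim_equal_get_c_coreItems := by
  intro transform_data c_set _
  unfold Spec_get_c_coreItems get_c_coreItems get_c_coreItems_alt
  set td : PySem.Dict Int (PySem.Dict Int (List Int)) :=
    PySem.Dict.ofList (transform_data.map (fun p => (p.1, PySem.Dict.ofList p.2))) with htd
  have hnd : ∀ r ∈ td.values, (r.items.map Prod.fst).Nodup := by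
    intro r hr
    rw [htd] at hr
    have hof : PySem.Dict.ofList (transform_data.map (fun p => (p.1, PySem.Dict.ofList p.2)))
        = (transform_data.map (fun p => (p.1, PySem.Dict.ofList p.2))).foldl
            (fun d p => d.insert p.1 p.2) PySem.Dict.empty := rfl
    rw [hof] at hr
    rcases pv_mem_values_foldl_insert _ _ _ hr with h | ⟨p, hp, hw⟩
    · simp [PySem.Dict.values, PySem.Dict.empty] at h
    · obtain ⟨q, _, hq⟩ := List.mem_map.mp hp
      have hrq : r = PySem.Dict.ofList q.2 := by rw [hw, ← hq]
      rw [hrq]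
      have hk := PySem.Dict.nodup_keys_ofList (κ := Int) (ν := List Int) q.2
      simpa [PySem.Dict.keys] using hk
  have hkey : ∀ k : Int,
      td.items.foldl (fun s row =>
        if row.2.contains k then s + ((row.2.getD k []).length : Int) else s) 0
      = (td.values.foldl (fun c inner =>
          inner.items.foldl (fun (c : PySem.Dict Int Int) p =>
            c.insert p.1 (c.getD p.1 0 + (p.2.length : Int))) c) PySem.Dict.empty).getD k 0 := by
    intro k
    rw [pv_A_sum, pv_counts_getD td.values k hnd]
    simp [PySem.Dict.values, PySem.Dict.getD_empty, List.map_map, Function.comp_def]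
  show (c_set.foldl (fun (d : PySem.Dict Int Int) k =>
      if td.items.foldl (fun s row =>
          if row.2.contains k then s + ((row.2.getD k []).length : Int) else s) 0 > 0
      then d.setdefault k (td.items.foldl (fun s row =>
          if row.2.contains k then s + ((row.2.getD k []).length : Int) else s) 0)
      else d) PySem.Dict.empty).items
    = (c_set.foldl (fun (d : PySem.Dict Int Int) k =>
      if (td.values.foldl (fun c inner =>
          inner.items.foldl (fun (c : PySem.Dict Int Int) p =>
            c.insert p.1 (c.getD p.1 0 + (p.2.length : Int))) c) PySem.Dict.empty).getD k 0 > 0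
      then d.setdefault k ((td.values.foldl (fun c inner =>
          inner.items.foldl (fun (c : PySem.Dict Int Int) p =>
            c.insert p.1 (c.getD p.1 0 + (p.2.length : Int))) c) PySem.Dict.empty).getD k 0)
      else d) PySem.Dict.empty).items
  have hF : (fun (d : PySem.Dict Int Int) k =>
      if td.items.foldl (fun s row =>
          if row.2.contains k then s + ((row.2.getD k []).length : Int) else s) 0 > 0
      then d.setdefault k (td.items.foldl (fun s row =>
          if row.2.contains k then s + ((row.2.getD k []).length : Int) else s) 0)
      else d)
    = (fun (d : PySem.Dict Int Int) k =>
      if (td.values.foldl (fun c inner =>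
          inner.items.foldl (fun (c : PySem.Dict Int Int) p =>
            c.insert p.1 (c.getD p.1 0 + (p.2.length : Int))) c) PySem.Dict.empty).getD k 0 > 0
      then d.setdefault k ((td.values.foldl (fun c inner =>
          inner.items.foldl (fun (c : PySem.Dict Int Int) p =>
            c.insert p.1 (c.getD p.1 0 + (p.2.length : Int))) c) PySem.Dict.empty).getD k 0)
      else d) := funext fun d => funext fun k => by rw [hkey k]
  rw [hF]
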